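-- pv_equiv track=rewrite | github.com/joysn/recursion_backtracking_dp | dp/noOfWays.py | noOfWays
-- ===== SOURCE A (Python) =====
-- def noOfWays(n):
--     if n <= 2:
--         return n
--     if n == 3:
--         return 4
--
--     ways = [0 for i in range(n+1)]
--     ways[1] = 1
--     ways[2] = 2
--     ways[3] = 4
--
--     for i in range(4,n+1):
--         ways[i] = ways[i-1]+ways[i-2]+ways[i-2]
--     return ways[-1]
-- ===== SOURCE B (Python) =====
-- def noOfWays(n):
--     # A's recurrence ways[i] = ways[i-1] + 2*ways[i-2] (from its seeded table)
--     # doubles at every step, so the answer is the power 2**(n-1); for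
--     # non-positive n the function returns n itself, exactly as A does.
--     return n if n <= 0 else 1 << (n - 1)
-- ===== Notes on version B (the rewrite author's own statement) =====
-- stated objective: faster
-- what changed: replaces the O(n) dynamic-programming table with the closed form: the recurrence doubles at every step, so the answer is two raised to one less than n, computed by a single bit shift
import Mathlib
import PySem

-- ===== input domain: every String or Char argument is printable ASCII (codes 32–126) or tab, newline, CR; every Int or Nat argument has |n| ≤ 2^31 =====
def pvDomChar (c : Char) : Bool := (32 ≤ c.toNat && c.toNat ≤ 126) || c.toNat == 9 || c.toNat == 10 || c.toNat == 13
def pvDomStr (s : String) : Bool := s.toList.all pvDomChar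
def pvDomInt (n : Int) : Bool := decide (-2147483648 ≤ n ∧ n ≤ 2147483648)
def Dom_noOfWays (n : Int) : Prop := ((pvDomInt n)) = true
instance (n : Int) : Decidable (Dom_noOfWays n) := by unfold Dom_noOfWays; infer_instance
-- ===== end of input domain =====

-- B replaces A's O(n) DP table with the closed form 2^(n-1) (one bit shift); return values proved equal.

-- ===== PORT A =====
-- loop body: ways[i] = ways[i-1] + ways[i-2] + ways[i-2]  (indices always in range when reached)
def noOfWaysStep (ws : List Int) (i : Int) : List Int :=
  PySem.List.pySetD ws i
    (PySem.List.pyGetD ws (i-1) 0 + PySem.List.pyGetD ws (i-2) 0 + PySem.List.pyGetD ws (i-2) 0)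

def noOfWays (n : Int) : Int :=
  if n ≤ 2 then n
  else if n = 3 then 4
  else
    let ways := (PySem.List.pyRange 0 (n+1) 1).map (fun _ => (0 : Int))
    let ways := PySem.List.pySetD ways 1 1
    let ways := PySem.List.pySetD ways 2 2
    let ways := PySem.List.pySetD ways 3 4
    let ways := (PySem.List.pyRange 4 (n+1) 1).foldl noOfWaysStep ways
    PySem.List.pyGetD ways (-1) 0   -- ways[-1]; the list is nonempty here (length n+1 ≥ 5)

-- ===== PORT B =====
def noOfWays_alt (n : Int) : Int :=
  if n ≤ 0 then n else 1 <<< (n - 1).toNat   -- 1 << (n - 1)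

-- ===== PRECONDITION & SPEC =====
def Spec_noOfWays (n : Int) (out : Int) : Prop := out = noOfWays_alt n
instance (n : Int) (out : Int) : Decidable (Spec_noOfWays n out) := by unfold Spec_noOfWays; infer_instance

-- ===== CLAIM (what is proved, stated in full; the proofs are below) =====
def Claim_equal_noOfWays : Prop := ∀ (n : Int), Dom_noOfWays n → Spec_noOfWays n (noOfWays n)

-- ===== LEMMAS AND PROOFS =====

-- loop invariant: folding the step over range(a, a+k) keeps the length and leaves
-- 2^(j-1) at the two positions just below a+k (all indices in range).
lemma noOfWays_inv (k : Nat) : ∀ (a : Int) (ws : List Int), 4 ≤ a →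
    a + (k : Int) ≤ (ws.length : Int) →
    PySem.List.pyGetD ws (a-1) 0 = 2 ^ (a-2).toNat →
    PySem.List.pyGetD ws (a-2) 0 = 2 ^ (a-3).toNat →
    ((PySem.List.pyRange a (a + (k : Int)) 1).foldl noOfWaysStep ws).length = ws.length ∧
    PySem.List.pyGetD ((PySem.List.pyRange a (a + (k : Int)) 1).foldl noOfWaysStep ws) (a + (k : Int) - 1) 0
      = 2 ^ (a + (k : Int) - 2).toNat := by
  induction k with
  | zero =>
    intro a ws ha hlen h1 h2
    rw [PySem.List.pyRange_one_eq_nil (by omega)]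
    refine ⟨by simp, ?_⟩
    simpa using h1
  | succ k ih =>
    intro a ws ha hlen h1 h2
    have hcast : a + ((k+1 : Nat) : Int) = (a+1) + (k : Int) := by push_cast; ring
    rw [hcast, PySem.List.pyRange_one_cons (by omega), List.foldl_cons]
    have hpos : (0:Int) ≤ a := by omega
    have hlt : a < (ws.length : Int) := by push_cast at hlen; omega
    have hsetlen : (noOfWaysStep ws a).length = ws.length := by
      simp [noOfWaysStep, PySem.List.length_pySetD]
    have hval : PySem.List.pyGetD (noOfWaysStep ws a) (a+1-1) 0 = 2 ^ (a+1-2).toNat := by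
      have hv : PySem.List.pyGetD (noOfWaysStep ws a) a 0 =
          2 ^ (a-2).toNat + 2 ^ (a-3).toNat + 2 ^ (a-3).toNat := by
        rw [noOfWaysStep, h1, h2, PySem.List.pySetD_of_nonneg _ _ hpos,
            PySem.List.pyGetD_eq_getElem _ _ hpos (by simpa using hlt)]
        simp
      have e0 : a + 1 - 1 = a := by ring
      rw [e0, hv]
      have e1 : (a-2).toNat = (a-3).toNat + 1 := by omega
      have e2 : (a+1-2).toNat = (a-3).toNat + 2 := by omega
      rw [e1, e2]; ring
    have hprev : PySem.List.pyGetD (noOfWaysStep ws a) (a+1-2) 0 = 2 ^ (a+1-3).toNat := by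
      have hne : PySem.List.pyGetD (noOfWaysStep ws a) (a-1) 0 = PySem.List.pyGetD ws (a-1) 0 := by
        have hl2 : a - 1 < ((noOfWaysStep ws a).length : Int) := by rw [hsetlen]; omega
        rw [PySem.List.pyGetD_eq_getElem _ _ (by omega : (0:Int) ≤ a - 1) hl2,
            PySem.List.pyGetD_eq_getElem _ _ (by omega : (0:Int) ≤ a - 1) (by omega)]
        simp only [noOfWaysStep, PySem.List.pySetD_of_nonneg _ _ hpos]
        rw [List.getElem_set_ne (by omega)]
      rw [show a+1-2 = a-1 by ring, show a+1-3 = a-2 by ring, hne, h1]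
    have hmain := ih (a+1) (noOfWaysStep ws a) (by omega)
      (by rw [hsetlen]; push_cast at hlen ⊢; omega) hval hprev
    exact ⟨by rw [hmain.1, hsetlen], hmain.2⟩

-- ===== VERDICT (by name: the statement is the Claim_ definition above) =====
theorem noOfWays_spec : Claim_equal_noOfWays := by
  intro n _
  unfold Spec_noOfWays noOfWays noOfWays_alt
  by_cases h0 : n ≤ 0
  · simp [show n ≤ 2 by omega, h0]
  · by_cases h1 : n ≤ 2
    · interval_cases n <;> decide
    · by_cases h3 : n = 3
      · subst h3; decide
      · -- main case: n ≥ 4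
        have hn4 : 4 ≤ n := by omega
        simp only [if_neg (by omega : ¬ n ≤ 2), if_neg h3, if_neg h0]
        set ws0 : List Int :=
          PySem.List.pySetD (PySem.List.pySetD (PySem.List.pySetD
            ((PySem.List.pyRange 0 (n+1) 1).map (fun _ => (0 : Int))) 1 1) 2 2) 3 4 with hws0
        have hdecomp : ws0 = 0 :: 1 :: 2 :: 4 :: List.replicate (n + 1 - 4).toNat (0 : Int) := by
          rw [hws0, PySem.List.pyRange_one_cons (by omega : (0:Int) < n+1),
              PySem.List.pyRange_one_cons (by omega : (0:Int)+1 < n+1),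
              PySem.List.pyRange_one_cons (by omega : (0:Int)+1+1 < n+1),
              PySem.List.pyRange_one_cons (by omega : (0:Int)+1+1+1 < n+1)]
          norm_num [PySem.List.pySetD_of_nonneg]
          rfl
        have hlen0 : (ws0.length : Int) = n + 1 := by
          rw [hws0]
          simp [PySem.List.length_pySetD, PySem.List.length_pyRange_one]
          omega
        have hget3 : PySem.List.pyGetD ws0 3 0 = (4 : Int) := by
          rw [PySem.List.pyGetD_eq_getElem ws0 0 (by omega) (by omega)]
          simp [hdecomp]
        have hget2 : PySem.List.pyGetD ws0 2 0 = (2 : Int) := by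
          rw [PySem.List.pyGetD_eq_getElem ws0 0 (by omega) (by omega)]
          simp [hdecomp]
        have hinv := noOfWays_inv (n - 3).toNat 4 ws0 (by omega)
          (by omega)
          (by rw [show (4:Int)-1 = 3 by norm_num, hget3]; decide)
          (by rw [show (4:Int)-2 = 2 by norm_num, hget2]; decide)
        have hrng : (4 : Int) + ((n-3).toNat : Int) = n + 1 := by omega
        rw [hrng] at hinv
        set rs := (PySem.List.pyRange 4 (n+1) 1).foldl noOfWaysStep ws0 with hrs
        have hrslen : (rs.length : Int) = n + 1 := by rw [hinv.1]; exact hlen0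
        have hlast : PySem.List.pyGetD rs (-1) 0 = PySem.List.pyGetD rs (n + 1 - 1) 0 := by
          rw [PySem.List.pyGetD_neg_ofNat rs 1 0 (by omega) (by omega),
              PySem.List.pyGetD_eq_getElem _ _ (by omega) (by omega)]
          congr 1
          omega
        rw [hlast, hinv.2]
        rw [show n + 1 - 2 = n - 1 by ring, Nat.shiftLeft_eq, one_mul, Nat.cast_pow]
        norm_num
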